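-- pv_equiv track=rewrite | github.com/devsnice/data-structures-algorithms | week-6/partitioningSouveniers.py | removeElementsUsedInKnapsack
-- ===== SOURCE A (Python) =====
-- def removeElementsUsedInKnapsack(array, knapsack):
--   resultArray = [];
--   deleted = [];
--
--   for index in range(len(array)):
--       if array[index] not in knapsack or array[index] in deleted:
--           resultArray.append(array[index])
--       else:
--           deleted.append(array[index])
--
--   return resultArray
-- ===== SOURCE B (Python) =====
-- def removeElementsUsedInKnapsack(array, knapsack):
--     remove_idx = set()
--     for v in knapsack:
--         if v in array:
--             remove_idx.add(array.index(v))
--     return [x for i, x in enumerate(array) if i not in remove_idx]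
-- ===== Notes on version B (the rewrite author's own statement) =====
-- stated objective: alternative
-- what changed: B first computes the set of indices of the first occurrence of each knapsack value via array.index, then filters the array by index in a second pass, instead of A's single interleaved loop that tracks a 'deleted' list of values.
import Mathlib
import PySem

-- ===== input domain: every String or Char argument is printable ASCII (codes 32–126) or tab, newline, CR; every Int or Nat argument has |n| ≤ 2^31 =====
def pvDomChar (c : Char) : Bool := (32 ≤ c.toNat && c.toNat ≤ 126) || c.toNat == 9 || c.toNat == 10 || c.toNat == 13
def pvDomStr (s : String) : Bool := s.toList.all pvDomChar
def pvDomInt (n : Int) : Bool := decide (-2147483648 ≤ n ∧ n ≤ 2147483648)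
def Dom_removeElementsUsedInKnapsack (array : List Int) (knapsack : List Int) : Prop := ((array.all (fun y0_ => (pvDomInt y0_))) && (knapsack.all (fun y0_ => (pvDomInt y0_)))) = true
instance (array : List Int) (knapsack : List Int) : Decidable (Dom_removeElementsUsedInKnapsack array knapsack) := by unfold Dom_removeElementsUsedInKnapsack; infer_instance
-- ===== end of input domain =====

-- B removes the first occurrence of each knapsack value by precomputing the set of first-occurrence
-- indices and filtering by index in a second pass (alternative decomposition, not claimed faster).

-- ===== PORT A =====
-- A: one loop over the array, appending each element either to resultArray or to a 'deleted' value list.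
def removeElementsUsedInKnapsack (array : List Int) (knapsack : List Int) : List Int :=
  (array.foldl
    (fun (st : List Int × List Int) x =>
      if !(knapsack.contains x) || st.2.contains x then (st.1 ++ [x], st.2)
      else (st.1, st.2 ++ [x]))
    ([], [])).1

-- ===== PORT B =====
-- B helper: the set {array.index(v) for v in knapsack if v in array}
def pvRemoveIdx (array : List Int) (knapsack : List Int) : PySem.Set Int :=
  knapsack.foldl
    (fun (s : PySem.Set Int) v =>
      match PySem.List.index? array v with
      | some i => PySem.Set.add s (i : Int)
      | none => s)
    PySem.Set.empty

def removeElementsUsedInKnapsack_alt (array : List Int) (knapsack : List Int) : List Int :=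
  let ri := pvRemoveIdx array knapsack
  ((PySem.List.enumerate array).filter (fun p => !(PySem.Set.contains ri p.1))).map (·.2)

-- ===== PRECONDITION & SPEC =====
def Spec_removeElementsUsedInKnapsack (array : List Int) (knapsack : List Int) (out : List Int) : Prop := out = removeElementsUsedInKnapsack_alt array knapsack
instance (array : List Int) (knapsack : List Int) (out : List Int) : Decidable (Spec_removeElementsUsedInKnapsack array knapsack out) := by unfold Spec_removeElementsUsedInKnapsack; infer_instance

-- ===== CLAIM (what is proved, stated in full; the proofs are below) =====
def Claim_equal_removeElementsUsedInKnapsack : Prop := ∀ (array : List Int) (knapsack : List Int), Dom_removeElementsUsedInKnapsack array knapsack → Spec_removeElementsUsedInKnapsack array knapsack (removeElementsUsedInKnapsack array knapsack)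

-- ===== LEMMAS AND PROOFS =====

-- Common reference: walk the suffix keeping a prefix; drop x iff x ∈ knapsack and x not in prefix.
def refK (knap : List Int) : List Int → List Int → List Int
  | _, [] => []
  | pre, x :: xs =>
    (if knap.contains x && !(pre.contains x) then [] else [x]) ++ refK knap (pre ++ [x]) xs

lemma A_fold (knap : List Int) : ∀ (xs pre res del : List Int),
    (∀ v, del.contains v = (knap.contains v && pre.contains v)) →
    (xs.foldl
      (fun (st : List Int × List Int) x =>
        if !(knap.contains x) || st.2.contains x then (st.1 ++ [x], st.2)
        else (st.1, st.2 ++ [x]))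
      (res, del)).1 = res ++ refK knap pre xs := by
  intro xs
  induction xs with
  | nil => intro pre res del _; simp [refK]
  | cons x xs ih =>
    intro pre res del hinv
    have hcond : (!(knap.contains x) || del.contains x)
        = !(knap.contains x && !(pre.contains x)) := by
      rw [hinv x]
      cases knap.contains x <;> cases pre.contains x <;> rfl
    simp only [List.foldl_cons, hcond, refK]
    by_cases hk : (knap.contains x && !(pre.contains x)) = true
    · have hkk : knap.contains x = true := by
        cases hK : knap.contains x
        · rw [hK] at hk; exact absurd hk (by simp)
        · rfl
      have hkp : pre.contains x = false := by
        cases hP : pre.contains x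
        · rfl
        · rw [hkk, hP] at hk; exact absurd hk (by simp)
      rw [hk]
      simp only [Bool.not_true, Bool.false_eq_true, if_false, if_true]
      rw [ih (pre ++ [x]) res (del ++ [x])]
      · simp
      · intro v
        rw [List.contains_append, List.contains_append, hinv v]
        by_cases hvx : v = x
        · subst hvx
          have hm : v ∈ knap := by simpa using hkk
          simp [hkp, hm]
        · have hx : ([x] : List Int).contains v = false := by
            simp [List.contains_cons, hvx, Ne.symm hvx]
          rw [hx]
          simp
    · have hk' : (knap.contains x && !(pre.contains x)) = false := by
        cases hC : (knap.contains x && !(pre.contains x))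
        · rfl
        · exact absurd hC hk
      rw [hk']
      simp only [Bool.not_false, Bool.false_eq_true, if_false, if_true]
      rw [ih (pre ++ [x]) (res ++ [x]) del]
      · simp
      · intro v
        rw [List.contains_append, hinv v]
        by_cases hvx : v = x
        · subst hvx
          have hx : ([v] : List Int).contains v = true := by simp
          rw [hx]
          cases hK : knap.contains v
          · simp [hK]
          · have hp : pre.contains v = true := by
              rw [hK] at hk'
              cases hP : pre.contains v
              · rw [hP] at hk'; exact absurd hk' (by simp)
              · rfl
            have hm : v ∈ pre := by simpa using hp
            simp [hK, hm]
        · have hx : ([x] : List Int).contains v = false := by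
            simp [List.contains_cons, hvx, Ne.symm hvx]
          rw [hx]
          simp

lemma mem_pvRemoveIdx (array : List Int) (knap : List Int) (j : Int) :
    PySem.Set.contains (pvRemoveIdx array knap) j = true ↔
      ∃ v ∈ knap, ∃ i : Nat, PySem.List.index? array v = some i ∧ (i : Int) = j := by
  unfold pvRemoveIdx
  suffices h : ∀ (s : PySem.Set Int),
      PySem.Set.contains
        (knap.foldl (fun (s : PySem.Set Int) v =>
          match PySem.List.index? array v with
          | some i => PySem.Set.add s (i : Int)
          | none => s) s) j = true ↔
      (PySem.Set.contains s j = true ∨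
        ∃ v ∈ knap, ∃ i : Nat, PySem.List.index? array v = some i ∧ (i : Int) = j) by
    rw [h]
    simp [PySem.Set.empty, PySem.Set.contains]
  induction knap with
  | nil => intro s; simp
  | cons v vs ih =>
    intro s
    simp only [List.foldl_cons]
    cases hidx : PySem.List.index? array v with
    | none =>
      rw [ih]
      constructor
      · rintro (h | ⟨w, hw, i, hi, hij⟩)
        · exact Or.inl h
        · exact Or.inr ⟨w, List.mem_cons_of_mem _ hw, i, hi, hij⟩
      · rintro (h | ⟨w, hw, i, hi, hij⟩)
        · exact Or.inl h
        · rcases List.mem_cons.mp hw with rfl | hw'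
          · rw [hidx] at hi; cases hi
          · exact Or.inr ⟨w, hw', i, hi, hij⟩
    | some i =>
      rw [ih]
      have hadd : PySem.Set.contains (PySem.Set.add s (i : Int)) j = true ↔
          (PySem.Set.contains s j = true ∨ (i : Int) = j) := by
        unfold PySem.Set.add
        by_cases hc : PySem.Set.contains s (i : Int) = true
        · simp only [hc]
          constructor
          · exact Or.inl
          · rintro (h | rfl)
            · exact h
            · exact hc
        · simp only [if_neg hc]
          unfold PySem.Set.contains at *
          rw [List.contains_append]
          constructor
          · intro hor
            rcases Bool.or_eq_true_iff.mp hor with h1 | h2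
            · exact Or.inl h1
            · right
              have hji : j = (i : Int) := by simpa [List.contains_cons] using h2
              exact hji.symm
          · rintro (h1 | rfl)
            · exact Bool.or_eq_true_iff.mpr (Or.inl h1)
            · refine Bool.or_eq_true_iff.mpr (Or.inr ?_)
              simp [List.contains_cons]
      rw [hadd]
      constructor
      · rintro ((h | rfl) | ⟨w, hw, i', hi', hij⟩)
        · exact Or.inl h
        · exact Or.inr ⟨v, List.mem_cons_self .., i, hidx, rfl⟩
        · exact Or.inr ⟨w, List.mem_cons_of_mem _ hw, i', hi', hij⟩
      · rintro (h | ⟨w, hw, i', hi', hij⟩)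
        · exact Or.inl (Or.inl h)
        · rcases List.mem_cons.mp hw with rfl | hw'
          · rw [hidx] at hi'; cases hi'; exact Or.inl (Or.inr hij)
          · exact Or.inr ⟨w, hw', i', hi', hij⟩

lemma index_at_split (pre : List Int) (x : Int) (suf : List Int) (v : Int) :
    PySem.List.index? (pre ++ x :: suf) v = some pre.length ↔ (v = x ∧ v ∉ pre) := by
  rw [PySem.List.index?_eq_some_iff]
  constructor
  · rintro ⟨p, s, heq, hlen, hnp⟩
    obtain ⟨hpp, htail⟩ := List.append_inj heq hlen.symm
    have hxv : x = v := (List.cons_eq_cons.mp htail).1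
    refine ⟨hxv.symm, ?_⟩
    rw [hpp]
    exact hnp
  · rintro ⟨rfl, hnp⟩
    exact ⟨pre, suf, rfl, rfl, hnp⟩

lemma ri_at (array knap pre : List Int) (x : Int) (xs : List Int)
    (harr : array = pre ++ x :: xs) :
    PySem.Set.contains (pvRemoveIdx array knap) (pre.length : Int)
      = (knap.contains x && !(pre.contains x)) := by
  by_cases h : (knap.contains x && !(pre.contains x)) = true
  · rw [h]
    rw [mem_pvRemoveIdx]
    have hk : knap.contains x = true := by
      cases hK : knap.contains x
      · rw [hK] at h; exact absurd h (by simp)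
      · rfl
    have hnp : pre.contains x = false := by
      cases hP : pre.contains x
      · rfl
      · rw [hk, hP] at h; exact absurd h (by simp)
    refine ⟨x, by simpa using hk, pre.length, ?_, rfl⟩
    rw [harr, index_at_split]
    exact ⟨rfl, by simpa using hnp⟩
  · have h' := Bool.eq_false_iff.mpr h
    rw [h']
    rw [← Bool.not_eq_true]
    rw [mem_pvRemoveIdx]
    rintro ⟨v, hv, i, hi, hij⟩
    have hiN : i = pre.length := by exact_mod_cast hij
    subst hiN
    rw [harr, index_at_split] at hi
    rcases hi with ⟨rfl, hnp⟩
    have hK : knap.contains v = true := by simpa using hv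
    have hP : pre.contains v = false := by simpa using hnp
    exact h (by rw [hK, hP]; rfl)
lemma B_filter (array knap : List Int) : ∀ (xs pre : List Int), array = pre ++ xs →
    ((PySem.List.enumerate xs (pre.length : Int)).filter
        (fun p => !(PySem.Set.contains (pvRemoveIdx array knap) p.1))).map (·.2)
      = refK knap pre xs := by
  intro xs
  induction xs with
  | nil => intro pre _; simp [refK, PySem.List.enumerate]
  | cons x xs ih =>
    intro pre harr
    rw [PySem.List.enumerate_cons]
    have hri := ri_at array knap pre x xs harr
    have harr' : array = (pre ++ [x]) ++ xs := by simpa using harr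
    have hlen : ((pre ++ [x]).length : Int) = (pre.length : Int) + 1 := by
      simp
    have ihx := ih (pre ++ [x]) harr'
    rw [hlen] at ihx
    simp only [List.filter_cons, hri, refK]
    by_cases h : (knap.contains x && !(pre.contains x)) = true
    · rw [h]
      simp only [Bool.not_true, Bool.false_eq_true, if_false, if_true, List.nil_append]
      exact ihx
    · have h' : (knap.contains x && !(pre.contains x)) = false := by
        cases hC : (knap.contains x && !(pre.contains x))
        · rfl
        · exact absurd hC h
      rw [h']
      simp only [Bool.not_false, Bool.false_eq_true, if_false, if_true, List.map_cons,
        List.singleton_append]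
      rw [ihx]

-- ===== VERDICT (by name: the statement is the Claim_ definition above) =====
theorem removeElementsUsedInKnapsack_spec : Claim_equal_removeElementsUsedInKnapsack := by
  intro array knapsack _
  unfold Spec_removeElementsUsedInKnapsack removeElementsUsedInKnapsack removeElementsUsedInKnapsack_alt
  rw [A_fold knapsack array [] [] [] (by intro v; simp)]
  have := B_filter array knapsack array [] (by simp)
  simpa using this.symm
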